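-- pv_equiv track=rewrite | github.com/MeisterDrinker94/DM2018 | DiSH/dish.py | epsilonNeighborhood
-- ===== SOURCE A (Python) =====
-- def epsilonNeighborhood(featureData,epsi,miu):
--     """
--     Find the epsi-neighborhoods for each point along the dimension given
--     by the vector featureData. Neighborhoods with less than miu points
--     are excluded.
--     """
--     # Array with index and Datavalue
--     features = [(x,y) for x,y in enumerate(featureData)]
--     # Sort the array by Datavalue
--     features.sort(key=lambda tup: tup[1])
--
--     # create Dictionary with objects for this candidate Subspace
--     neighbourInfo = dict()
--
--     for o in range(0,len(features)):
--         i = o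
--         while(i >= 0 and abs(features[o][1]-features[i][1]) <= epsi):
--             #adds indices to dictonary
--             if features[o][0] in neighbourInfo.keys():
--                 neighbourInfo[features[o][0]].add(features[i][0])
--             else:
--                 neighbourInfo[features[o][0]] = {features[i][0]}
--
--             if features[i][0] in neighbourInfo.keys():
--                 neighbourInfo[features[i][0]].add(features[o][0])
--             else:
--                 neighbourInfo[features[i][0]] = {features[o][0]}
--             i = i - 1;
--
--     #Trim dict s.t. only neighbourhoods with more than miu items remain
--     #THEY SHALL PASS!!!!
--     neighbourInfo = { k:v for k,v in neighbourInfo.items() if len(v) >= miu }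
--
--     return neighbourInfo
-- ===== SOURCE B (Python) =====
-- def epsilonNeighborhood(featureData, epsi, miu):
--     """
--     Same task, computed per point: sort the points once, then for each point
--     expand its epsi-window left and right in the sorted order and collect the
--     neighbour set directly; keep only neighbourhoods of at least miu points.
--     """
--     pts = sorted(enumerate(featureData), key=lambda p: p[1])
--     n = len(pts)
--     out = {}
--     for o in range(n):
--         idx, v = pts[o]
--         s = set()
--         i = o
--         while i >= 0 and abs(v - pts[i][1]) <= epsi:
--             s.add(pts[i][0])
--             i = i - 1
--         j = o + 1
--         while j < n and abs(pts[j][1] - v) <= epsi: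
--             s.add(pts[j][0])
--             j = j + 1
--         if s and len(s) >= miu:
--             out[idx] = s
--     return out
-- ===== Notes on version B (the rewrite author's own statement) =====
-- stated objective: alternative
-- what changed: Instead of building all neighbourhood sets simultaneously through symmetric dict-of-sets insertions during a single downward scan and filtering afterwards, B computes each point's neighbourhood independently by expanding its epsilon-window left and right in the sorted order, inserting each kept entry once with its filter applied inline.
import Mathlib
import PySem

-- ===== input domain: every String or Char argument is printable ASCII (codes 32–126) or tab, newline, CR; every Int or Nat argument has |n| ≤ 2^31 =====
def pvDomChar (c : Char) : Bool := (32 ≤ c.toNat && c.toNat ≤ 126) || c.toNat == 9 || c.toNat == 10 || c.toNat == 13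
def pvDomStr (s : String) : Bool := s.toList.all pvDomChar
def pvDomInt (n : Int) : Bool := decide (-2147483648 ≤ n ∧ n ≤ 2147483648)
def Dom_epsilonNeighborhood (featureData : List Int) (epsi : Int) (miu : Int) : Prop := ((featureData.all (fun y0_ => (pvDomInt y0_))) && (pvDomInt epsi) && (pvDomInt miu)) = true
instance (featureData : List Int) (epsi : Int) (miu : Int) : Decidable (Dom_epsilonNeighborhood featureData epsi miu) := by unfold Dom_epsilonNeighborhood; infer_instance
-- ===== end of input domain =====

-- B replaces A's symmetric dict-of-sets insertion scan (sort, downward-only window walk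
-- updating every touched entry, post-hoc filter) by an equal-cost alternative: one sort, then
-- each point's neighbourhood computed independently by a two-sided window expansion with the
-- size filter applied inline.


-- ===== PORT A =====
-- A: sort enumerate(featureData) by value; for each sorted position o scan downward
-- while within epsi, inserting both directions into a dict of sets; filter by miu.
def pvAAdd (d : PySem.Dict Int (List Int)) (k x : Int) : PySem.Dict Int (List Int) :=
  if d.contains k then d.modify k PySem.Set.empty (fun s => PySem.Set.add s x)
  else d.insert k (PySem.Set.add PySem.Set.empty x)

-- the inner 'while(i >= 0 and abs(features[o][1]-features[i][1]) <= epsi)' loop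
def pvAWhile (features : List (Int × Int)) (epsi : Int) (o : Int) (i : Int)
    (d : PySem.Dict Int (List Int)) : PySem.Dict Int (List Int) :=
  if h : 0 ≤ i ∧ |(PySem.List.pyGetD features o (0, 0)).2 - (PySem.List.pyGetD features i (0, 0)).2| ≤ epsi then
    pvAWhile features epsi o (i - 1)
      (pvAAdd (pvAAdd d (PySem.List.pyGetD features o (0, 0)).1 (PySem.List.pyGetD features i (0, 0)).1)
        (PySem.List.pyGetD features i (0, 0)).1 (PySem.List.pyGetD features o (0, 0)).1)
  else d
termination_by (i + 1).toNat
decreasing_by omega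

def epsilonNeighborhood (featureData : List Int) (epsi : Int) (miu : Int) : List (Int × List Int) :=
  let features := PySem.List.sorted (PySem.List.enumerate featureData) (fun tup => tup.2) false
  let d := (PySem.List.pyRange 0 (features.length : Int) 1).foldl
    (fun d o => pvAWhile features epsi o o d) PySem.Dict.empty
  -- dict comprehension { k:v for k,v in d.items() if len(v) >= miu }
  (d.items.foldl
    (fun (acc : PySem.Dict Int (List Int)) kv =>
      if miu ≤ PySem.Set.len kv.2 then acc.insert kv.1 kv.2 else acc)
    PySem.Dict.empty).items

-- ===== PORT B =====
-- B: sort once, then compute each point's neighbourhood independently by expanding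
-- its window left and right in sorted order; keep it if nonempty and of size >= miu.
def pvBLeft (pts : List (Int × Int)) (epsi : Int) (v : Int) (i : Int) (s : List Int) : List Int :=
  if h : 0 ≤ i ∧ |v - (PySem.List.pyGetD pts i (0, 0)).2| ≤ epsi then
    pvBLeft pts epsi v (i - 1) (PySem.Set.add s (PySem.List.pyGetD pts i (0, 0)).1)
  else s
termination_by (i + 1).toNat
decreasing_by omega

def pvBRight (pts : List (Int × Int)) (epsi : Int) (v : Int) (j : Int) (s : List Int) : List Int :=
  if h : j < (pts.length : Int) ∧ |(PySem.List.pyGetD pts j (0, 0)).2 - v| ≤ epsi then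
    pvBRight pts epsi v (j + 1) (PySem.Set.add s (PySem.List.pyGetD pts j (0, 0)).1)
  else s
termination_by ((pts.length : Int) - j).toNat
decreasing_by omega

def epsilonNeighborhood_alt (featureData : List Int) (epsi : Int) (miu : Int) : List (Int × List Int) :=
  let pts := PySem.List.sorted (PySem.List.enumerate featureData) (fun p => p.2) false
  ((PySem.List.pyRange 0 (pts.length : Int) 1).foldl
    (fun (out : PySem.Dict Int (List Int)) o =>
      let idx := (PySem.List.pyGetD pts o (0, 0)).1
      let v := (PySem.List.pyGetD pts o (0, 0)).2
      let s := pvBRight pts epsi v (o + 1) (pvBLeft pts epsi v o PySem.Set.empty)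
      if s ≠ [] ∧ miu ≤ PySem.Set.len s then out.insert idx s else out)
    PySem.Dict.empty).items

-- ===== PRECONDITION & SPEC =====
def Spec_epsilonNeighborhood (featureData : List Int) (epsi : Int) (miu : Int) (out : List (Int × List Int)) : Prop := out = epsilonNeighborhood_alt featureData epsi miu
instance (featureData : List Int) (epsi : Int) (miu : Int) (out : List (Int × List Int)) : Decidable (Spec_epsilonNeighborhood featureData epsi miu out) := by unfold Spec_epsilonNeighborhood; infer_instance

-- ===== CLAIM (what is proved, stated in full; the proofs are below) =====
def Claim_equal_epsilonNeighborhood : Prop := ∀ (featureData : List Int) (epsi : Int) (miu : Int), Dom_epsilonNeighborhood featureData epsi miu → Spec_epsilonNeighborhood featureData epsi miu (epsilonNeighborhood featureData epsi miu)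

-- ===== LEMMAS AND PROOFS =====

-- spec-level views of the sorted point list
def pvVal (fs : List (Int × Int)) (t : Nat) : Int := (fs.getD t (0, 0)).2
def pvIdx (fs : List (Int × Int)) (t : Nat) : Int := (fs.getD t (0, 0)).1

-- positions walked downward from j-1 (inclusive start j-1) while |v - val| <= eps
def pvWalkL (fs : List (Int × Int)) (eps v : Int) : Nat → List Nat
  | 0 => []
  | j + 1 => if |v - pvVal fs j| ≤ eps then j :: pvWalkL fs eps v j else []

-- positions walked upward from j for at most f steps while |val - v| <= eps
def pvWalkR (fs : List (Int × Int)) (eps v : Int) : Nat → Nat → List Nat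
  | 0, _ => []
  | f + 1, j => if |pvVal fs j - v| ≤ eps then j :: pvWalkR fs eps v f (j + 1) else []

-- the indices strictly above t, below m, within eps of t (ascending)
def pvRlist (fs : List (Int × Int)) (eps : Int) (t m : Nat) : List Int :=
  ((List.range m).filter (fun u => decide (t < u) && decide (|pvVal fs u - pvVal fs t| ≤ eps))).map (pvIdx fs)

-- the finished neighbourhood list of sorted position t, with right part up to m
def pvEnt (fs : List (Int × Int)) (eps : Int) (t m : Nat) : List Int :=
  (pvWalkL fs eps (pvVal fs t) (t + 1)).map (pvIdx fs) ++ pvRlist fs eps t m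

def pvMono (fs : List (Int × Int)) : Prop :=
  ∀ a b : Nat, a ≤ b → b < fs.length → pvVal fs a ≤ pvVal fs b

def pvInj (fs : List (Int × Int)) : Prop :=
  ∀ a b : Nat, a < fs.length → b < fs.length → pvIdx fs a = pvIdx fs b → a = b

-- partially updated front entries during A's inner loop at point m (i = k-1)
def pvFr (fs : List (Int × Int)) (eps : Int) (m k : Nat) : List (Int × List Int) :=
  (List.range m).map (fun t => (pvIdx fs t, pvEnt fs eps t m ++ if k ≤ t then [pvIdx fs m] else []))

lemma pvModifyEq {κ ν : Type} [BEq κ] (d : PySem.Dict κ ν) (k : κ) (d0 : ν) (f : ν → ν) :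
    d.modify k d0 f = d.insert k (f (d.getD k d0)) := rfl

lemma mem_pvWalkL (fs : List (Int × Int)) (eps v : Int) :
    ∀ j p, p ∈ pvWalkL fs eps v j → p < j := by
  intro j
  induction j with
  | zero => intro p hp; simp [pvWalkL] at hp
  | succ j ih =>
    intro p hp
    rw [pvWalkL] at hp
    split at hp
    · rcases List.mem_cons.1 hp with h | h
      · omega
      · have := ih p h; omega
    · simp at hp

lemma mem_pvWalkR (fs : List (Int × Int)) (eps v : Int) :
    ∀ f j p, p ∈ pvWalkR fs eps v f j → j ≤ p ∧ p < j + f := by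
  intro f
  induction f with
  | zero => intro j p hp; simp [pvWalkR] at hp
  | succ f ih =>
    intro j p hp
    rw [pvWalkR] at hp
    split at hp
    · rcases List.mem_cons.1 hp with h | h
      · omega
      · have := ih (j + 1) p h; omega
    · simp at hp

lemma pvWalkL_all (fs : List (Int × Int)) (eps v : Int) :
    ∀ j, (∀ u, u < j → |v - pvVal fs u| ≤ eps) →
    pvWalkL fs eps v j = (List.range' 0 j).reverse := by
  intro j
  induction j with
  | zero => intro _; simp [pvWalkL]
  | succ j ih =>
    intro h
    rw [pvWalkL, if_pos (h j (by omega)), ih (fun u hu => h u (by omega)),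
      List.range'_concat]
    simp

lemma pvWalkL_desc (fs : List (Int × Int)) (eps v : Int) (k : Nat)
    (hk : ¬ |v - pvVal fs k| ≤ eps) :
    ∀ j, k < j → (∀ u, k < u → u < j → |v - pvVal fs u| ≤ eps) →
    pvWalkL fs eps v j = (List.range' (k + 1) (j - k - 1)).reverse := by
  intro j
  induction j with
  | zero => omega
  | succ j ih =>
    intro hkj h
    by_cases hj : k = j
    · subst hj
      rw [pvWalkL, if_neg hk]
      simp
    · have hkj' : k < j := by omega
      rw [pvWalkL, if_pos (h j (by omega) (by omega)),
        ih hkj' (fun u hu1 hu2 => h u hu1 (by omega))]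
      have h2 : j + 1 - k - 1 = (j - k - 1) + 1 := by omega
      rw [h2, List.range'_concat]
      have h3 : k + 1 + 1 * (j - k - 1) = j := by omega
      rw [h3]
      simp

lemma pvWalkR_takeWhile (fs : List (Int × Int)) (eps v : Int) :
    ∀ f j, pvWalkR fs eps v f j
      = (List.range' j f).takeWhile (fun u => decide (|pvVal fs u - v| ≤ eps)) := by
  intro f
  induction f with
  | zero => intro j; simp [pvWalkR]
  | succ f ih =>
    intro j
    rw [pvWalkR, List.range'_succ, List.takeWhile_cons]
    split
    · next h => simp [decide_eq_true h, ih]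
    · next h => simp [h]

lemma pvTakeWhile_eq_filter (p : Nat → Bool) :
    ∀ f j, (∀ a b, j ≤ a → a ≤ b → b < j + f → p b = true → p a = true) →
    (List.range' j f).takeWhile p = (List.range' j f).filter p := by
  intro f
  induction f with
  | zero => intro j _; simp
  | succ f ih =>
    intro j h
    rw [List.range'_succ, List.takeWhile_cons, List.filter_cons]
    by_cases hj : p j = true
    · rw [hj]
      simp only [if_true]
      rw [ih (j + 1) (fun a b ha hab hb hpb => h a b (by omega) hab (by omega) hpb)]
    · have hall : ∀ x ∈ List.range' (j + 1) f, ¬ p x = true := by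
        intro x hx hpx
        exact hj (h j x (le_refl j) (by
          have := List.mem_range'_1.1 hx; omega) (by
          have := List.mem_range'_1.1 hx; omega) hpx)
      rw [List.filter_eq_nil_iff.2 hall]
      simp [hj]
    
-- B's left loop is the left walk, appended to a disjoint accumulator
lemma pvBLeft_eq (fs : List (Int × Int)) (eps v : Int) (hinj : pvInj fs) :
    ∀ (k : Nat) (i : Int) (s : List Int), (i + 1).toNat = k → k ≤ fs.length →
    (∀ p ∈ pvWalkL fs eps v k, pvIdx fs p ∉ s) →
    pvBLeft fs eps v i s = s ++ (pvWalkL fs eps v k).map (pvIdx fs) := by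
  intro k
  induction k with
  | zero =>
    intro i s hik _ _
    rw [pvBLeft, dif_neg (by omega), pvWalkL]
    simp
  | succ k ih =>
    intro i s hik hkn hfresh
    have hi : i = ((k : Nat) : Int) := by omega
    subst hi
    rw [pvBLeft]
    rw [pvWalkL] at hfresh ⊢
    simp only [PySem.List.pyGetD_natCast]
    by_cases hc : |v - pvVal fs k| ≤ eps
    · rw [if_pos hc] at hfresh ⊢
      rw [dif_pos ⟨by omega, by simpa [pvVal] using hc⟩]
      have hadd : PySem.Set.add s (pvIdx fs k) = s ++ [pvIdx fs k] := by
        simp [PySem.Set.add, PySem.Set.contains,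
          hfresh k (List.mem_cons_self)]
      have : ((k : Int) - 1 + 1).toNat = k := by omega
      rw [show (fs.getD k (0,0)).1 = pvIdx fs k from rfl, hadd,
        ih ((k : Int) - 1) (s ++ [pvIdx fs k]) this (by omega) ?_]
      · simp
      · intro p hp
        have hpk := mem_pvWalkL fs eps v k p hp
        simp only [List.mem_append, List.mem_singleton]
        push Not
        refine ⟨hfresh p (List.mem_cons_of_mem _ hp), fun he => ?_⟩
        exact absurd (hinj p k (by omega) (by omega) he) (by omega)
    · rw [if_neg hc] at hfresh ⊢
      rw [dif_neg (by
        rintro ⟨-, habs⟩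
        exact hc (by simpa [pvVal] using habs))]
      simp

lemma pvBRight_eq (fs : List (Int × Int)) (eps v : Int) (hinj : pvInj fs) :
    ∀ (k : Nat) (j : Int) (s : List Int), 0 ≤ j → ((fs.length : Int) - j).toNat = k →
    (∀ p ∈ pvWalkR fs eps v k j.toNat, pvIdx fs p ∉ s) →
    pvBRight fs eps v j s = s ++ (pvWalkR fs eps v k j.toNat).map (pvIdx fs) := by
  intro k
  induction k with
  | zero =>
    intro j s hj hjk _
    rw [pvBRight, dif_neg (by omega), pvWalkR]
    simp
  | succ k ih =>
    intro j s hj hjk hfresh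
    have hjn : j.toNat < fs.length := by omega
    rw [pvBRight]
    rw [pvWalkR] at hfresh ⊢
    have hget : PySem.List.pyGetD fs j (0, 0) = fs.getD j.toNat (0, 0) := by
      rw [show j = ((j.toNat : Nat) : Int) by omega, PySem.List.pyGetD_natCast,
        Int.toNat_natCast]
    by_cases hc : |pvVal fs j.toNat - v| ≤ eps
    · rw [if_pos hc] at hfresh ⊢
      rw [dif_pos ⟨by omega, by rw [hget]; exact hc⟩]
      have hadd : PySem.Set.add s (pvIdx fs j.toNat) = s ++ [pvIdx fs j.toNat] := by
        simp [PySem.Set.add, PySem.Set.contains,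
          hfresh j.toNat (List.mem_cons_self)]
      have hk' : ((fs.length : Int) - (j + 1)).toNat = k := by omega
      have hj1 : (j + 1).toNat = j.toNat + 1 := by omega
      rw [hget, show (fs.getD j.toNat (0,0)).1 = pvIdx fs j.toNat from rfl, hadd,
        ih (j + 1) (s ++ [pvIdx fs j.toNat]) (by omega) hk' ?_]
      · rw [hj1]; simp
      · rw [hj1]
        intro p hp
        have hpj := mem_pvWalkR fs eps v k (j.toNat + 1) p hp
        simp only [List.mem_append, List.mem_singleton]
        push Not
        refine ⟨hfresh p (List.mem_cons_of_mem _ hp), fun he => ?_⟩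
        exact absurd (hinj p j.toNat (by omega) (by omega) he) (by omega)
    · rw [if_neg hc] at hfresh ⊢
      rw [dif_neg (by
        rintro ⟨-, habs⟩
        rw [hget] at habs
        exact hc habs)]
      simp

lemma pvMapReplaceId (l : List (Int × List Int)) (k : Int) (w : List Int)
    (h : k ∉ l.map Prod.fst) :
    l.map (fun p => if p.1 == k then (k, w) else p) = l := by
  have h1 : ∀ p ∈ l, (fun p : Int × List Int => if p.1 == k then (k, w) else p) p = id p := by
    intro p hp
    have : p.1 ≠ k := fun he => h (he ▸ List.mem_map_of_mem hp)
    simp [this]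
  rw [List.map_congr_left h1, List.map_id]

lemma pvIdxNodup (fs : List (Int × Int)) (hinj : pvInj fs) (j : Nat) (hj : j ≤ fs.length) :
    ((List.range j).map (pvIdx fs)).Nodup := by
  refine List.Nodup.map_on ?_ List.nodup_range
  intro a ha b hb he
  exact hinj a b (by have := List.mem_range.1 ha; omega) (by have := List.mem_range.1 hb; omega) he

-- effect of A's dict insertion on an association list holding k with value v
lemma pvAAdd_eq (l₁ l₂ : List (Int × List Int)) (k x : Int) (v : List Int)
    (hnd : (((l₁ ++ (k, v) :: l₂)).map Prod.fst).Nodup) (hx : x ∉ v) :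
    pvAAdd (PySem.Dict.mk (l₁ ++ (k, v) :: l₂)) k x
      = PySem.Dict.mk (l₁ ++ (k, v ++ [x]) :: l₂) := by
  simp only [List.map_append, List.map_cons, List.nodup_append, List.nodup_cons] at hnd
  obtain ⟨h1, ⟨h2, h3⟩, hdisj⟩ := hnd
  have hk1 : k ∉ l₁.map Prod.fst := fun hmem => (hdisj _ hmem k List.mem_cons_self) rfl
  have hmem : (k, v) ∈ (PySem.Dict.mk (l₁ ++ (k, v) :: l₂)).items :=
    List.mem_append.2 (Or.inr (List.mem_cons_self))
  have hcont : (PySem.Dict.mk (l₁ ++ (k, v) :: l₂)).contains k = true := by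
    rw [PySem.Dict.contains_iff_mem_keys]
    exact PySem.Dict.mem_keys_of_mem_items _ hmem
  have hndk : (PySem.Dict.mk (l₁ ++ (k, v) :: l₂)).keys.Nodup := by
    show ((l₁ ++ (k, v) :: l₂).map Prod.fst).Nodup
    simp only [List.map_append, List.map_cons, List.nodup_append, List.nodup_cons]
    exact ⟨h1, ⟨h2, h3⟩, hdisj⟩
  rw [pvAAdd, if_pos hcont, pvModifyEq,
    PySem.Dict.getD_of_mem_items _ hmem hndk]
  have hadd : PySem.Set.add v x = v ++ [x] := by
    simp [PySem.Set.add, PySem.Set.contains, hx]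
  rw [hadd]
  apply PySem.Dict.ext
  rw [PySem.Dict.items_insert_of_contains _ _ hcont]
  show (l₁ ++ (k, v) :: l₂).map _ = _
  rw [List.map_append, List.map_cons]
  rw [pvMapReplaceId _ _ _ hk1, pvMapReplaceId _ _ _ h2]
  simp

-- adding an element already present leaves the dict unchanged
lemma pvAAdd_mem (l₁ l₂ : List (Int × List Int)) (k x : Int) (v : List Int)
    (hnd : (((l₁ ++ (k, v) :: l₂)).map Prod.fst).Nodup) (hx : x ∈ v) :
    pvAAdd (PySem.Dict.mk (l₁ ++ (k, v) :: l₂)) k x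
      = PySem.Dict.mk (l₁ ++ (k, v) :: l₂) := by
  simp only [List.map_append, List.map_cons, List.nodup_append, List.nodup_cons] at hnd
  obtain ⟨h1, ⟨h2, h3⟩, hdisj⟩ := hnd
  have hk1 : k ∉ l₁.map Prod.fst := fun hmem => (hdisj _ hmem k List.mem_cons_self) rfl
  have hmem : (k, v) ∈ (PySem.Dict.mk (l₁ ++ (k, v) :: l₂)).items :=
    List.mem_append.2 (Or.inr (List.mem_cons_self))
  have hcont : (PySem.Dict.mk (l₁ ++ (k, v) :: l₂)).contains k = true := by
    rw [PySem.Dict.contains_iff_mem_keys]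
    exact PySem.Dict.mem_keys_of_mem_items _ hmem
  have hndk : (PySem.Dict.mk (l₁ ++ (k, v) :: l₂)).keys.Nodup := by
    show ((l₁ ++ (k, v) :: l₂).map Prod.fst).Nodup
    simp only [List.map_append, List.map_cons, List.nodup_append, List.nodup_cons]
    exact ⟨h1, ⟨h2, h3⟩, hdisj⟩
  rw [pvAAdd, if_pos hcont, pvModifyEq,
    PySem.Dict.getD_of_mem_items _ hmem hndk]
  have hadd : PySem.Set.add v x = v := by
    simp [PySem.Set.add, PySem.Set.contains, hx]
  rw [hadd]
  apply PySem.Dict.ext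
  rw [PySem.Dict.items_insert_of_contains _ _ hcont]
  show (l₁ ++ (k, v) :: l₂).map _ = _
  rw [List.map_append, List.map_cons]
  rw [pvMapReplaceId _ _ _ hk1, pvMapReplaceId _ _ _ h2]
  simp

-- adding under a fresh key appends a singleton entry
lemma pvAAdd_new (l : List (Int × List Int)) (k x : Int)
    (hk : k ∉ l.map Prod.fst) :
    pvAAdd (PySem.Dict.mk l) k x = PySem.Dict.mk (l ++ [(k, [x])]) := by
  have hcont : (PySem.Dict.mk l).contains k = false := by
    rw [← Bool.not_eq_true, PySem.Dict.contains_iff_mem_keys]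
    exact hk
  rw [pvAAdd, if_neg (by simp [hcont])]
  apply PySem.Dict.ext
  rw [PySem.Dict.items_insert_of_not_contains _ _ hcont]
  rfl

lemma pvRlist_succ (fs : List (Int × Int)) (eps : Int) (t m : Nat) :
    pvRlist fs eps t (m + 1) = pvRlist fs eps t m
      ++ (if t < m ∧ |pvVal fs m - pvVal fs t| ≤ eps then [pvIdx fs m] else []) := by
  unfold pvRlist
  rw [List.range_succ, List.filter_append, List.map_append]
  congr 1
  by_cases h1 : t < m
  · by_cases h2 : |pvVal fs m - pvVal fs t| ≤ eps
    · simp [h1, h2]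
    · simp [h1, h2]
  · simp [h1]

lemma pvRlist_self (fs : List (Int × Int)) (eps : Int) (m : Nat) :
    pvRlist fs eps m (m + 1) = [] := by
  unfold pvRlist
  rw [List.filter_eq_nil_iff.2, List.map_nil]
  intro u hu
  have := List.mem_range.1 hu
  simp only [Bool.and_eq_true, decide_eq_true_eq, not_and]
  omega

lemma pvIdx_not_mem_pvEnt (fs : List (Int × Int)) (eps : Int) (hinj : pvInj fs)
    (k m : Nat) (hk : k < m) (hm : m < fs.length) :
    pvIdx fs m ∉ pvEnt fs eps k m := by
  unfold pvEnt pvRlist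
  rw [List.mem_append]
  push Not
  constructor
  · intro hmem
    obtain ⟨q, hq, he⟩ := List.mem_map.1 hmem
    have hqk := mem_pvWalkL fs eps _ _ q hq
    exact absurd (hinj q m (by omega) hm he) (by omega)
  · intro hmem
    obtain ⟨q, hq, he⟩ := List.mem_map.1 hmem
    have hqm : q < m := List.mem_range.1 (List.mem_of_mem_filter hq)
    exact absurd (hinj q m (by omega) hm he) (by omega)

lemma map_fst_pvFr (fs : List (Int × Int)) (eps : Int) (m k : Nat) :
    (pvFr fs eps m k).map Prod.fst = (List.range m).map (pvIdx fs) := by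
  unfold pvFr
  rw [List.map_map]
  rfl

lemma pvFr_split (fs : List (Int × Int)) (eps : Int) (m k : Nat) (hk : k < m) :
    pvFr fs eps m (k + 1)
      = (List.range' 0 k).map (fun t => (pvIdx fs t, pvEnt fs eps t m ++ if k + 1 ≤ t then [pvIdx fs m] else []))
        ++ (pvIdx fs k, pvEnt fs eps k m)
          :: (List.range' (k + 1) (m - k - 1)).map (fun t => (pvIdx fs t, pvEnt fs eps t m ++ if k + 1 ≤ t then [pvIdx fs m] else [])) := by
  unfold pvFr
  rw [List.range_eq_range']
  have hsplit : List.range' 0 m = List.range' 0 k ++ List.range' k (m - k) := by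
    have h := List.range'_append (s := 0) (m := k) (n := m - k) (step := 1)
    rw [Nat.zero_add, Nat.one_mul, show k + (m - k) = m by omega] at h
    exact h.symm
  rw [hsplit, show m - k = (m - k - 1) + 1 by omega, List.range'_succ]
  rw [List.map_append, List.map_cons]
  congr 2
  simp

lemma pvFr_split' (fs : List (Int × Int)) (eps : Int) (m k : Nat) (hk : k < m) :
    pvFr fs eps m k
      = (List.range' 0 k).map (fun t => (pvIdx fs t, pvEnt fs eps t m ++ if k + 1 ≤ t then [pvIdx fs m] else []))
        ++ (pvIdx fs k, pvEnt fs eps k m ++ [pvIdx fs m])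
          :: (List.range' (k + 1) (m - k - 1)).map (fun t => (pvIdx fs t, pvEnt fs eps t m ++ if k + 1 ≤ t then [pvIdx fs m] else [])) := by
  unfold pvFr
  rw [List.range_eq_range']
  have hsplit : List.range' 0 m = List.range' 0 k ++ List.range' k (m - k) := by
    have h := List.range'_append (s := 0) (m := k) (n := m - k) (step := 1)
    rw [Nat.zero_add, Nat.one_mul, show k + (m - k) = m by omega] at h
    exact h.symm
  rw [hsplit, show m - k = (m - k - 1) + 1 by omega, List.range'_succ]
  rw [List.map_append, List.map_cons]
  congr 1
  · apply List.map_congr_left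
    intro t ht
    have := List.mem_range'_1.1 ht
    have h1 : ¬ k ≤ t := by omega
    have h2 : ¬ k + 1 ≤ t := by omega
    simp [h1, h2]
  · congr 1
    · simp
    · apply List.map_congr_left
      intro t ht
      have := List.mem_range'_1.1 ht
      have h1 : k ≤ t := by omega
      have h2 : k + 1 ≤ t := by omega
      simp [h1, h2]

lemma pvIdx_def (fs : List (Int × Int)) (t : Nat) : (fs.getD t (0, 0)).1 = pvIdx fs t := rfl
lemma pvVal_def (fs : List (Int × Int)) (t : Nat) : (fs.getD t (0, 0)).2 = pvVal fs t := rfl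

-- A's inner while loop at sorted position m, entered with i = k - 1
lemma pvAwhileInv (fs : List (Int × Int)) (eps : Int) (hmono : pvMono fs) (hinj : pvInj fs)
    (he : 0 ≤ eps) (m : Nat) (hm : m < fs.length) :
    ∀ (k : Nat), k ≤ m → (∀ u : Nat, k ≤ u → u < m → |pvVal fs m - pvVal fs u| ≤ eps) →
    pvAWhile fs eps (m : Int) ((k : Int) - 1)
      (PySem.Dict.mk (pvFr fs eps m k
        ++ [(pvIdx fs m, pvIdx fs m :: ((List.range' k (m - k)).reverse.map (pvIdx fs)))]))
    = PySem.Dict.mk ((List.range (m + 1)).map (fun t => (pvIdx fs t, pvEnt fs eps t (m + 1)))) := by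
  intro k
  induction k with
  | zero =>
    intro _ hwalk
    rw [pvAWhile, dif_neg (by rintro ⟨h, -⟩; omega)]
    congr 1
    rw [List.range_succ, List.map_append]
    congr 1
    · unfold pvFr
      apply List.map_congr_left
      intro t ht
      have htm := List.mem_range.1 ht
      simp only [Nat.zero_le, if_true]
      unfold pvEnt
      rw [pvRlist_succ, if_pos ⟨htm, hwalk t (by omega) htm⟩, List.append_assoc]
    · simp only [List.map_cons, List.map_nil]
      have hwl : pvWalkL fs eps (pvVal fs m) (m + 1) = (List.range' 0 (m + 1)).reverse := by
        apply pvWalkL_all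
        intro u hu
        rcases Nat.lt_succ_iff_lt_or_eq.1 hu with h | h
        · exact hwalk u (by omega) h
        · subst h; simpa using he
      have hsplit : (List.range' 0 (m + 1)).reverse = m :: (List.range' 0 m).reverse := by
        rw [List.range'_concat]
        simp
      unfold pvEnt
      rw [pvRlist_self, List.append_nil, hwl, hsplit]
      simp
  | succ k ih =>
    intro hk1 hwalk
    have hcast : ((k + 1 : Nat) : Int) - 1 = ((k : Nat) : Int) := by push_cast; ring
    rw [hcast, pvAWhile]
    have hgetm : PySem.List.pyGetD fs ((m : Nat) : Int) (0, 0) = fs.getD m (0, 0) :=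
      PySem.List.pyGetD_natCast ..
    have hgetk : PySem.List.pyGetD fs ((k : Nat) : Int) (0, 0) = fs.getD k (0, 0) :=
      PySem.List.pyGetD_natCast ..
    have hndall : (((List.range m).map (pvIdx fs) ++ [pvIdx fs m])).Nodup := by
      have := pvIdxNodup fs hinj (m + 1) (by omega)
      rwa [List.range_succ, List.map_append] at this
    by_cases hc : |pvVal fs m - pvVal fs k| ≤ eps
    · rw [dif_pos ⟨by omega, by rw [hgetm, hgetk]; simp only [pvVal_def]; exact hc⟩]
      simp only [hgetm, hgetk, pvIdx_def]
      have hnd1 : ((pvFr fs eps m (k + 1)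
          ++ (pvIdx fs m, pvIdx fs m :: ((List.range' (k + 1) (m - (k + 1))).reverse.map (pvIdx fs))) :: []).map Prod.fst).Nodup := by
        rw [List.map_append, map_fst_pvFr]
        simpa using hndall
      have hx1 : pvIdx fs k ∉ pvIdx fs m :: ((List.range' (k + 1) (m - (k + 1))).reverse.map (pvIdx fs)) := by
        intro hmem
        rcases List.mem_cons.1 hmem with h | h
        · exact absurd (hinj k m (by omega) hm h) (by omega)
        · obtain ⟨q, hq, he'⟩ := List.mem_map.1 h
          have hq' := List.mem_range'_1.1 (List.mem_reverse.1 hq)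
          exact absurd (hinj q k (by omega) (by omega) he') (by omega)
      rw [pvAAdd_eq _ _ _ _ _ hnd1 hx1]
      have hXk : (pvIdx fs m :: ((List.range' (k + 1) (m - (k + 1))).reverse.map (pvIdx fs))) ++ [pvIdx fs k]
          = pvIdx fs m :: ((List.range' k (m - k)).reverse.map (pvIdx fs)) := by
        rw [List.cons_append]
        congr 1
        rw [show m - k = (m - k - 1) + 1 by omega, List.range'_succ, List.reverse_cons,
          List.map_append, show m - (k + 1) = m - k - 1 by omega]
        simp
      rw [hXk]
      rw [pvFr_split fs eps m k (by omega)]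
      simp only [List.append_assoc, List.cons_append]
      have hnd2 : (((List.range' 0 k).map (fun t => (pvIdx fs t, pvEnt fs eps t m ++ if k + 1 ≤ t then [pvIdx fs m] else []))
          ++ (pvIdx fs k, pvEnt fs eps k m)
            :: ((List.range' (k + 1) (m - k - 1)).map (fun t => (pvIdx fs t, pvEnt fs eps t m ++ if k + 1 ≤ t then [pvIdx fs m] else []))
              ++ [(pvIdx fs m, pvIdx fs m :: ((List.range' k (m - k)).reverse.map (pvIdx fs)))])).map Prod.fst).Nodup := by
        have hre : ((List.range' 0 k).map (fun t => (pvIdx fs t, pvEnt fs eps t m ++ if k + 1 ≤ t then [pvIdx fs m] else []))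
            ++ (pvIdx fs k, pvEnt fs eps k m)
              :: ((List.range' (k + 1) (m - k - 1)).map (fun t => (pvIdx fs t, pvEnt fs eps t m ++ if k + 1 ≤ t then [pvIdx fs m] else []))
                ++ [(pvIdx fs m, pvIdx fs m :: ((List.range' k (m - k)).reverse.map (pvIdx fs)))]))
            = (pvFr fs eps m (k + 1)
                ++ [(pvIdx fs m, pvIdx fs m :: ((List.range' k (m - k)).reverse.map (pvIdx fs)))]) := by
          rw [pvFr_split fs eps m k (by omega)]
          simp only [List.append_assoc, List.cons_append]
        rw [hre, List.map_append, map_fst_pvFr]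
        simpa using hndall
      have hx2 : pvIdx fs m ∉ pvEnt fs eps k m :=
        pvIdx_not_mem_pvEnt fs eps hinj k m (by omega) hm
      rw [pvAAdd_eq _ _ _ _ _ hnd2 hx2]
      have hre2 : ((List.range' 0 k).map (fun t => (pvIdx fs t, pvEnt fs eps t m ++ if k + 1 ≤ t then [pvIdx fs m] else []))
          ++ (pvIdx fs k, pvEnt fs eps k m ++ [pvIdx fs m])
            :: ((List.range' (k + 1) (m - k - 1)).map (fun t => (pvIdx fs t, pvEnt fs eps t m ++ if k + 1 ≤ t then [pvIdx fs m] else []))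
              ++ [(pvIdx fs m, pvIdx fs m :: ((List.range' k (m - k)).reverse.map (pvIdx fs)))]))
          = (pvFr fs eps m k
              ++ [(pvIdx fs m, pvIdx fs m :: ((List.range' k (m - k)).reverse.map (pvIdx fs)))]) := by
        rw [pvFr_split' fs eps m k (by omega)]
        simp only [List.append_assoc, List.cons_append]
      rw [hre2]
      apply ih (by omega)
      intro u hu1 hu2
      rcases Nat.eq_or_lt_of_le hu1 with h | h
      · subst h; exact hc
      · exact hwalk u (by omega) hu2
    · rw [dif_neg (by
        rintro ⟨-, hca⟩
        rw [hgetm, hgetk] at hca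
        simp only [pvVal_def] at hca
        exact hc hca)]
      congr 1
      rw [List.range_succ, List.map_append]
      congr 1
      · unfold pvFr
        apply List.map_congr_left
        intro t ht
        have htm := List.mem_range.1 ht
        by_cases hle : k + 1 ≤ t
        · rw [if_pos hle]
          unfold pvEnt
          rw [pvRlist_succ, if_pos ⟨htm, hwalk t hle htm⟩, List.append_assoc]
        · rw [if_neg hle]
          have hnc : ¬ (t < m ∧ |pvVal fs m - pvVal fs t| ≤ eps) := by
            rintro ⟨-, hcc⟩
            have h1 : pvVal fs t ≤ pvVal fs k := hmono t k (by omega) (by omega)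
            have h2 : pvVal fs k ≤ pvVal fs m := hmono k m (by omega) hm
            rw [abs_of_nonneg (by omega)] at hcc
            exact hc (by rw [abs_of_nonneg (by omega)]; omega)
          unfold pvEnt
          rw [pvRlist_succ, if_neg hnc]
          simp
      · simp only [List.map_cons, List.map_nil]
        have hwl : pvWalkL fs eps (pvVal fs m) (m + 1)
            = m :: (List.range' (k + 1) (m - (k + 1))).reverse := by
          rw [pvWalkL, if_pos (by simpa using he),
            pvWalkL_desc fs eps (pvVal fs m) k hc m (by omega)
              (fun u h1 h2 => hwalk u (by omega) h2),
            show m - k - 1 = m - (k + 1) by omega]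
        unfold pvEnt
        rw [pvRlist_self, List.append_nil, hwl]
        simp

-- A's outer loop builds the dict of fully-finished entries
lemma pvAfoldChar (fs : List (Int × Int)) (eps : Int) (hmono : pvMono fs) (hinj : pvInj fs)
    (he : 0 ≤ eps) :
    ∀ m, m ≤ fs.length →
    (List.range m).foldl (fun d (t : Nat) => pvAWhile fs eps (t : Int) (t : Int) d) PySem.Dict.empty
      = PySem.Dict.mk ((List.range m).map (fun t => (pvIdx fs t, pvEnt fs eps t m))) := by
  intro m
  induction m with
  | zero => intro _; rfl
  | succ m ihm =>
    intro hm1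
    have hm : m < fs.length := by omega
    rw [List.range_succ, List.foldl_append, ihm (by omega), List.foldl_cons, List.foldl_nil]
    have hgetm : PySem.List.pyGetD fs ((m : Nat) : Int) (0, 0) = fs.getD m (0, 0) :=
      PySem.List.pyGetD_natCast ..
    rw [pvAWhile, dif_pos ⟨by omega, by rw [hgetm]; simp [he]⟩]
    simp only [hgetm, pvIdx_def]
    have hknot : pvIdx fs m ∉ ((List.range m).map (fun t => (pvIdx fs t, pvEnt fs eps t m))).map Prod.fst := by
      rw [List.map_map]
      intro hmem
      obtain ⟨q, hq, he'⟩ := List.mem_map.1 hmem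
      exact absurd (hinj q m (by have := List.mem_range.1 hq; omega) hm he') (by have := List.mem_range.1 hq; omega)
    rw [pvAAdd_new _ _ _ hknot]
    have hnd : ((((List.range m).map (fun t => (pvIdx fs t, pvEnt fs eps t m))
        ++ (pvIdx fs m, [pvIdx fs m]) :: []).map Prod.fst)).Nodup := by
      rw [List.map_append, List.map_map]
      have h2 := pvIdxNodup fs hinj (m + 1) (by omega)
      rw [List.range_succ, List.map_append] at h2
      exact h2
    rw [pvAAdd_mem _ _ _ _ _ hnd (List.mem_singleton.2 rfl)]
    have hshape : ((List.range m).map (fun t => (pvIdx fs t, pvEnt fs eps t m))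
        ++ [(pvIdx fs m, [pvIdx fs m])])
        = pvFr fs eps m m ++ [(pvIdx fs m, pvIdx fs m :: ((List.range' m (m - m)).reverse.map (pvIdx fs)))] := by
      congr 1
      · unfold pvFr
        apply List.map_congr_left
        intro t ht
        have := List.mem_range.1 ht
        have : ¬ m ≤ t := by omega
        simp [this]
      · simp
    rw [hshape, ← List.range_succ]
    exact pvAwhileInv fs eps hmono hinj he m hm m (le_refl m) (fun u h1 h2 => by omega)

-- with a negative epsilon A's loops never fire
lemma pvAfoldNeg (fs : List (Int × Int)) (eps : Int) (he : eps < 0) :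
    ∀ m, (List.range m).foldl (fun d (t : Nat) => pvAWhile fs eps (t : Int) (t : Int) d) PySem.Dict.empty
      = PySem.Dict.empty := by
  intro m
  induction m with
  | zero => rfl
  | succ m ihm =>
    rw [List.range_succ, List.foldl_append, ihm, List.foldl_cons, List.foldl_nil]
    rw [pvAWhile, dif_neg (by
      rintro ⟨-, hca⟩
      rw [sub_self, abs_zero] at hca
      omega)]

-- the final dict comprehension is a filter on the items list
lemma pvFilterFold (miu : Int) (l : List (Int × List Int)) (hnd : (l.map Prod.fst).Nodup) :
    (l.foldl (fun (acc : PySem.Dict Int (List Int)) kv =>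
        if miu ≤ PySem.Set.len kv.2 then acc.insert kv.1 kv.2 else acc) PySem.Dict.empty).items
      = l.filter (fun kv => decide (miu ≤ PySem.Set.len kv.2)) := by
  rw [show (fun (acc : PySem.Dict Int (List Int)) kv =>
      if miu ≤ PySem.Set.len kv.2 then acc.insert kv.1 kv.2 else acc)
      = (fun (acc : PySem.Dict Int (List Int)) kv =>
      if (fun kv : Int × List Int => decide (miu ≤ PySem.Set.len kv.2)) kv = true
        then acc.insert kv.1 kv.2 else acc) from by funext acc kv; simp]
  rw [← List.foldl_filter]
  have h := PySem.Dict.items_foldl_insert_fresh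
    (l := l.filter (fun kv => decide (miu ≤ PySem.Set.len kv.2)))
    (k := Prod.fst) (v := Prod.snd) (d := PySem.Dict.empty)
    (by intro a _; exact PySem.Dict.contains_empty ..)
    ((List.filter_sublist.map Prod.fst).nodup hnd)
  exact h.trans (by simp [show (PySem.Dict.empty : PySem.Dict Int (List Int)).items = [] from rfl])

lemma pvEnt_ne_nil (fs : List (Int × Int)) (eps : Int) (he : 0 ≤ eps) (t m : Nat) :
    pvEnt fs eps t m ≠ [] := by
  unfold pvEnt
  rw [pvWalkL, if_pos (by simpa using he)]
  simp


-- B's two walks produce exactly the finished entry of position t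
lemma pvBw (fs : List (Int × Int)) (eps : Int) (hmono : pvMono fs) (hinj : pvInj fs)
    (t : Nat) (ht : t < fs.length) :
    pvBRight fs eps (pvVal fs t) ((t : Int) + 1)
        (pvBLeft fs eps (pvVal fs t) (t : Int) PySem.Set.empty)
      = pvEnt fs eps t fs.length := by
  have hleft := pvBLeft_eq fs eps (pvVal fs t) hinj (t + 1) (t : Int) PySem.Set.empty
    (by omega) (by omega) (by intro p hp; simp [PySem.Set.empty])
  rw [hleft, show (PySem.Set.empty : List Int) = [] from rfl, List.nil_append]
  have htn : ((t : Int) + 1).toNat = t + 1 := by omega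
  have hright := pvBRight_eq fs eps (pvVal fs t) hinj (fs.length - (t + 1)) ((t : Int) + 1)
    ((pvWalkL fs eps (pvVal fs t) (t + 1)).map (pvIdx fs)) (by omega) (by omega) ?_
  · rw [htn] at hright
    rw [hright]
    unfold pvEnt
    congr 1
    rw [pvWalkR_takeWhile, pvTakeWhile_eq_filter _ _ _ ?_]
    · unfold pvRlist
      rw [List.range_eq_range']
      have hsplit : List.range' 0 fs.length
          = List.range' 0 (t + 1) ++ List.range' (t + 1) (fs.length - (t + 1)) := by
        have h := List.range'_append (s := 0) (m := t + 1) (n := fs.length - (t + 1)) (step := 1)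
        rw [Nat.zero_add, Nat.one_mul, show t + 1 + (fs.length - (t + 1)) = fs.length by omega] at h
        exact h.symm
      rw [hsplit, List.filter_append]
      have h1 : (List.range' 0 (t + 1)).filter
          (fun u => decide (t < u) && decide (|pvVal fs u - pvVal fs t| ≤ eps)) = [] := by
        apply List.filter_eq_nil_iff.2
        intro u hu
        have := List.mem_range'_1.1 hu
        simp only [Bool.and_eq_true, decide_eq_true_eq, not_and]
        omega
      rw [h1, List.nil_append]
      congr 1
      apply List.filter_congr
      intro u hu
      have := List.mem_range'_1.1 hu
      simp [show t < u by omega]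
    · intro a b ha hab hb hpb
      simp only [decide_eq_true_eq] at hpb ⊢
      have h1 : pvVal fs t ≤ pvVal fs a := hmono t a (by omega) (by omega)
      have h2 : pvVal fs a ≤ pvVal fs b := hmono a b hab (by omega)
      rw [abs_of_nonneg (by omega)] at hpb ⊢
      omega
  · rw [htn]
    intro p hp
    have hpb := mem_pvWalkR fs eps (pvVal fs t) (fs.length - (t + 1)) (t + 1) p hp
    intro hmem
    obtain ⟨q, hq, he'⟩ := List.mem_map.1 hmem
    have hq' := mem_pvWalkL fs eps (pvVal fs t) (t + 1) q hq
    exact absurd (hinj q p (by omega) (by omega) he') (by omega)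

-- B's loop inserts the kept entries in index order of the sorted list
lemma pvBfold (fs : List (Int × Int)) (eps miu : Int) (hinj : pvInj fs) :
    ∀ m, m ≤ fs.length →
    (List.range m).foldl (fun (out : PySem.Dict Int (List Int)) (t : Nat) =>
        if pvEnt fs eps t fs.length ≠ [] ∧ miu ≤ PySem.Set.len (pvEnt fs eps t fs.length)
          then out.insert (pvIdx fs t) (pvEnt fs eps t fs.length) else out) PySem.Dict.empty
      = PySem.Dict.mk (((List.range m).filter
          (fun t => decide (pvEnt fs eps t fs.length ≠ [] ∧ miu ≤ PySem.Set.len (pvEnt fs eps t fs.length)))).map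
            (fun t => (pvIdx fs t, pvEnt fs eps t fs.length))) := by
  intro m
  induction m with
  | zero => intro _; rfl
  | succ m ihm =>
    intro hm1
    rw [List.range_succ, List.foldl_append, ihm (by omega), List.foldl_cons, List.foldl_nil,
      List.filter_append]
    by_cases hq : pvEnt fs eps m fs.length ≠ [] ∧ miu ≤ PySem.Set.len (pvEnt fs eps m fs.length)
    · rw [if_pos hq]
      have hcont : (PySem.Dict.mk (((List.range m).filter
          (fun t => decide (pvEnt fs eps t fs.length ≠ [] ∧ miu ≤ PySem.Set.len (pvEnt fs eps t fs.length)))).map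
            (fun t => (pvIdx fs t, pvEnt fs eps t fs.length)))).contains (pvIdx fs m) = false := by
        rw [← Bool.not_eq_true, PySem.Dict.contains_iff_mem_keys]
        show pvIdx fs m ∉ (List.map _ _).map Prod.fst
        rw [List.map_map]
        intro hmem
        obtain ⟨q, hq', he'⟩ := List.mem_map.1 hmem
        have hqm := List.mem_range.1 (List.mem_of_mem_filter hq')
        exact absurd (hinj q m (by omega) (by omega) he') (by omega)
      apply PySem.Dict.ext
      rw [PySem.Dict.items_insert_of_not_contains _ _ hcont]
      show _ = (List.map _ (_ ++ List.filter _ [m]))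
      rw [List.filter_cons]
      simp only [decide_eq_true_eq, if_pos hq, List.filter_nil, List.map_append, List.map_cons,
        List.map_nil]
    · rw [if_neg hq]
      congr 1
      rw [List.filter_cons]
      simp only [decide_eq_true_eq, if_neg hq, List.filter_nil]
      simp

theorem pvMain (featureData : List Int) (epsi miu : Int) :
    epsilonNeighborhood featureData epsi miu = epsilonNeighborhood_alt featureData epsi miu := by
  simp only [epsilonNeighborhood, epsilonNeighborhood_alt]
  set fs := PySem.List.sorted (PySem.List.enumerate featureData) (fun tup => tup.2) false with hfs
  have hpair : fs.Pairwise (fun a b => a.2 ≤ b.2) := PySem.List.sorted_pairwise ..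
  have hmono : pvMono fs := by
    intro a b hab hbn
    rcases Nat.eq_or_lt_of_le hab with h | h
    · subst h; exact le_refl _
    · unfold pvVal
      rw [List.getD_eq_getElem _ _ (by omega), List.getD_eq_getElem _ _ hbn]
      exact List.pairwise_iff_getElem.1 hpair a b (by omega) hbn h
  have hnd : (fs.map Prod.fst).Nodup := by
    have hperm : fs.Perm (PySem.List.enumerate featureData) := PySem.List.sorted_perm ..
    have h2 : (PySem.List.enumerate featureData 0).map Prod.fst
        = PySem.List.pyRange 0 (0 + featureData.length) 1 := PySem.List.map_fst_enumerate ..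
    refine (hperm.map Prod.fst).nodup_iff.2 ?_
    rw [show PySem.List.enumerate featureData = PySem.List.enumerate featureData 0 from rfl, h2]
    exact PySem.List.nodup_pyRange_one ..
  have hinj : pvInj fs := by
    intro a b ha hb he
    have hma : (fs.map Prod.fst)[a]'(by simpa) = pvIdx fs a := by
      rw [List.getElem_map]
      unfold pvIdx
      rw [List.getD_eq_getElem _ _ ha]
    have hmb : (fs.map Prod.fst)[b]'(by simpa) = pvIdx fs b := by
      rw [List.getElem_map]
      unfold pvIdx
      rw [List.getD_eq_getElem _ _ hb]
    exact (List.Nodup.getElem_inj_iff hnd).1 (by rw [hma, hmb]; exact he)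
  by_cases hsign : 0 ≤ epsi
  · -- A side
    rw [PySem.List.pyRange_zero_nat, List.foldl_map]
    rw [pvAfoldChar fs epsi hmono hinj hsign fs.length (le_refl _)]
    rw [show (PySem.Dict.mk ((List.range fs.length).map
        (fun t => (pvIdx fs t, pvEnt fs epsi t fs.length)))).items
      = (List.range fs.length).map (fun t => (pvIdx fs t, pvEnt fs epsi t fs.length)) from rfl]
    rw [pvFilterFold miu _ (by
      rw [List.map_map]
      exact pvIdxNodup fs hinj fs.length (le_refl _))]
    -- B side
    rw [List.foldl_map]
    have hcongr := PySem.List.foldl_congr_mem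
      (l := List.range fs.length) (init := (PySem.Dict.empty : PySem.Dict Int (List Int)))
      (f := fun (out : PySem.Dict Int (List Int)) (t : Nat) =>
        if pvBRight fs epsi (PySem.List.pyGetD fs (t : Int) (0, 0)).2 ((t : Int) + 1)
              (pvBLeft fs epsi (PySem.List.pyGetD fs (t : Int) (0, 0)).2 (t : Int) PySem.Set.empty) ≠ []
            ∧ miu ≤ PySem.Set.len (pvBRight fs epsi (PySem.List.pyGetD fs (t : Int) (0, 0)).2 ((t : Int) + 1)
              (pvBLeft fs epsi (PySem.List.pyGetD fs (t : Int) (0, 0)).2 (t : Int) PySem.Set.empty))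
          then out.insert (PySem.List.pyGetD fs (t : Int) (0, 0)).1
            (pvBRight fs epsi (PySem.List.pyGetD fs (t : Int) (0, 0)).2 ((t : Int) + 1)
              (pvBLeft fs epsi (PySem.List.pyGetD fs (t : Int) (0, 0)).2 (t : Int) PySem.Set.empty))
          else out)
      (g := fun (out : PySem.Dict Int (List Int)) (t : Nat) =>
        if pvEnt fs epsi t fs.length ≠ [] ∧ miu ≤ PySem.Set.len (pvEnt fs epsi t fs.length)
          then out.insert (pvIdx fs t) (pvEnt fs epsi t fs.length) else out)
      (by
        intro out t ht
        have htn : t < fs.length := List.mem_range.1 ht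
        simp only [PySem.List.pyGetD_natCast, pvIdx_def, pvVal_def,
          pvBw fs epsi hmono hinj t htn])
    rw [hcongr, pvBfold fs epsi miu hinj fs.length (le_refl _)]
    rw [show (PySem.Dict.mk (((List.range fs.length).filter
        (fun t => decide (pvEnt fs epsi t fs.length ≠ [] ∧ miu ≤ PySem.Set.len (pvEnt fs epsi t fs.length)))).map
          (fun t => (pvIdx fs t, pvEnt fs epsi t fs.length)))).items
      = ((List.range fs.length).filter
        (fun t => decide (pvEnt fs epsi t fs.length ≠ [] ∧ miu ≤ PySem.Set.len (pvEnt fs epsi t fs.length)))).map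
          (fun t => (pvIdx fs t, pvEnt fs epsi t fs.length)) from rfl]
    rw [List.filter_map]
    congr 1
    apply List.filter_congr
    intro t ht
    simp [Function.comp, pvEnt_ne_nil fs epsi hsign t fs.length]
  · -- negative epsilon: both sides are empty
    have hneg : epsi < 0 := by omega
    rw [PySem.List.pyRange_zero_nat, List.foldl_map]
    rw [pvAfoldNeg fs epsi hneg fs.length]
    rw [List.foldl_map]
    have hcongr := PySem.List.foldl_congr_mem
      (l := List.range fs.length) (init := (PySem.Dict.empty : PySem.Dict Int (List Int)))
      (f := fun (out : PySem.Dict Int (List Int)) (t : Nat) =>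
        if pvBRight fs epsi (PySem.List.pyGetD fs (t : Int) (0, 0)).2 ((t : Int) + 1)
              (pvBLeft fs epsi (PySem.List.pyGetD fs (t : Int) (0, 0)).2 (t : Int) PySem.Set.empty) ≠ []
            ∧ miu ≤ PySem.Set.len (pvBRight fs epsi (PySem.List.pyGetD fs (t : Int) (0, 0)).2 ((t : Int) + 1)
              (pvBLeft fs epsi (PySem.List.pyGetD fs (t : Int) (0, 0)).2 (t : Int) PySem.Set.empty))
          then out.insert (PySem.List.pyGetD fs (t : Int) (0, 0)).1
            (pvBRight fs epsi (PySem.List.pyGetD fs (t : Int) (0, 0)).2 ((t : Int) + 1)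
              (pvBLeft fs epsi (PySem.List.pyGetD fs (t : Int) (0, 0)).2 (t : Int) PySem.Set.empty))
          else out)
      (g := fun (out : PySem.Dict Int (List Int)) (t : Nat) => out)
      (by
        intro out t ht
        beta_reduce
        have hleft : pvBLeft fs epsi (PySem.List.pyGetD fs (t : Int) (0, 0)).2 (t : Int) PySem.Set.empty
            = PySem.Set.empty := by
          rw [pvBLeft, dif_neg (by
            rintro ⟨-, h⟩
            rw [sub_self, abs_zero] at h
            omega)]
        have hright : pvBRight fs epsi (PySem.List.pyGetD fs (t : Int) (0, 0)).2 ((t : Int) + 1)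
            PySem.Set.empty = PySem.Set.empty := by
          rw [pvBRight, dif_neg (by
            rintro ⟨-, h⟩
            have := abs_nonneg ((PySem.List.pyGetD fs ((t : Int) + 1) (0, 0)).2
              - (PySem.List.pyGetD fs (t : Int) (0, 0)).2)
            omega)]
        rw [hleft, hright]
        rw [if_neg (by rintro ⟨h, -⟩; exact h rfl)])
    rw [hcongr]
    simp [show (PySem.Dict.empty : PySem.Dict Int (List Int)).items = [] from rfl]

-- ===== VERDICT (by name: the statement is the Claim_ definition above) =====
theorem epsilonNeighborhood_spec : Claim_equal_epsilonNeighborhood := by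
  intro featureData epsi miu _
  unfold Spec_epsilonNeighborhood
  exact pvMain featureData epsi miu
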